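-- pv_equiv track=rewrite | github.com/Bumbi54/Advent20 | Day17/Day17.py | parseInputFile
-- ===== SOURCE A (Python) =====
-- def parseInputFile(fileContent, dimensions):
--     """
--     Parse input file into set mapping.
--     """
--
--     startCoordinateSystem = set()
--     x = 0
--     y = 0
--     for line in fileContent:
--         for location in line:
--             if location == "#":
--
--                 coordinate = (x, y)
--                 for newDimension in range(2, dimensions):
--                     coordinate = coordinate + (0,)
--                 startCoordinateSystem.add(coordinate)
--
--             if location == "\n":
--                 y = 0
--                 x += 1
--             else:
--                 y += 1
--
--     return startCoordinateSystem
-- ===== SOURCE B (Python) =====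
-- def parseInputFile(fileContent, dimensions):
--     """
--     Parse input file into set mapping.
--     """
--     grid = "".join(fileContent)
--     result = set()
--     for i, c in enumerate(grid):
--         if c == "#":
--             rows = grid[:i].split("\n")
--             result.add((len(rows) - 1, len(rows[-1])) + (0,) * (dimensions - 2))
--     return result
-- ===== Notes on version B (the rewrite author's own statement) =====
-- stated objective: alternative
-- what changed: A keeps running x/y counters updated per character with a newline branch; B carries no state at all: for each '#' at index i in the joined grid it recomputes the coordinate from scratch as (len(rows)-1, len(rows[-1])) where rows = grid[:i].split('\n').
import Mathlib
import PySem

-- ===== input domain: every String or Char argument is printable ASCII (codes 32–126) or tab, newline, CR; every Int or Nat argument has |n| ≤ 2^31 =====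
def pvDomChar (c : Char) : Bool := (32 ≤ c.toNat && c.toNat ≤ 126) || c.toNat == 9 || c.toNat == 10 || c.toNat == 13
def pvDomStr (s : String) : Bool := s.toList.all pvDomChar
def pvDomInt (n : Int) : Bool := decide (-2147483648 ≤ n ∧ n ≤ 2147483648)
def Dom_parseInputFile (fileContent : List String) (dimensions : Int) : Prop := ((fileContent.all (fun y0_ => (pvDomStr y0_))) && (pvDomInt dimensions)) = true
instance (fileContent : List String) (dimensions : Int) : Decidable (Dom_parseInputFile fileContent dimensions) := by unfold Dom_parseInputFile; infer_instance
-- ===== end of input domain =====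

-- B drops A's running x/y state machine entirely: for each '#' it recomputes the coordinate
-- from scratch as (pieces-1, len(last piece)) of the prefix split on '\n' (objective: alternative;
-- not faster). Both return the set in first-insertion order; no argument is mutated.

-- ===== PORT A =====
def parseInputFile (fileContent : List String) (dimensions : Int) : List (List Int) :=
  (fileContent.foldl
    (fun (st : PySem.Set (List Int) × Int × Int) line =>
      line.toList.foldl
        (fun st location =>
          let st1 :=
            if location = '#' then
              (PySem.Set.add st.1
                ((PySem.List.pyRange 2 dimensions 1).foldl
                  (fun coordinate _ => coordinate ++ [(0 : Int)]) [st.2.1, st.2.2]),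
               st.2)
            else st
          if location = '\n' then (st1.1, st1.2.1 + 1, (0 : Int))
          else (st1.1, st1.2.1, st1.2.2 + 1))
        st)
    (([] : PySem.Set (List Int)), (0 : Int), (0 : Int))).1

-- ===== PORT B =====
-- Python's (0,) * (dimensions - 2) is empty for dimensions ≤ 2; `.toNat` clamps exactly the same way.
def parseInputFile_alt (fileContent : List String) (dimensions : Int) : List (List Int) :=
  let grid := PySem.Str.join "" fileContent
  (PySem.List.enumerate grid.toList 0).foldl
    (fun s ic =>
      if ic.2 = '#' then
        match PySem.Str.split? (PySem.Str.slice grid none (some ic.1)) "\n" with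
        | none => s        -- unreachable: the separator "\n" is nonempty
        | some rows =>
          match PySem.List.pyGet? rows (-1) with
          | none => s      -- unreachable: split? always returns a nonempty list
          | some last => PySem.Set.add s
              ([(rows.length : Int) - 1, PySem.Str.len last] ++ List.replicate (dimensions - 2).toNat 0)
      else s)
    ([] : PySem.Set (List Int))

-- ===== PRECONDITION & SPEC =====
def Spec_parseInputFile (fileContent : List String) (dimensions : Int) (out : List (List Int)) : Prop := out = parseInputFile_alt fileContent dimensions
instance (fileContent : List String) (dimensions : Int) (out : List (List Int)) : Decidable (Spec_parseInputFile fileContent dimensions out) := by unfold Spec_parseInputFile; infer_instance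

-- ===== CLAIM (what is proved, stated in full; the proofs are below) =====
def Claim_equal_parseInputFile : Prop := ∀ (fileContent : List String) (dimensions : Int), Dom_parseInputFile fileContent dimensions → Spec_parseInputFile fileContent dimensions (parseInputFile fileContent dimensions)

-- ===== LEMMAS AND PROOFS =====

-- A's state machine step, with the coordinate written as [x, y] ++ pad.
def pvStepA (pad : List Int) (st : PySem.Set (List Int) × Int × Int) (c : Char) :
    PySem.Set (List Int) × Int × Int :=
  let st1 := if c = '#' then (PySem.Set.add st.1 ([st.2.1, st.2.2] ++ pad), st.2) else st
  if c = '\n' then (st1.1, st1.2.1 + 1, (0 : Int)) else (st1.1, st1.2.1, st1.2.2 + 1)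

-- split a char list on '\n' (always returns at least one piece)
def pvSplitNL : List Char → List (List Char)
  | [] => [[]]
  | c :: cs =>
    if c = '\n' then [] :: pvSplitNL cs
    else
      match pvSplitNL cs with
      | [] => [[c]]
      | r :: rs => (c :: r) :: rs

-- length of the last piece of the prefix split
def pvLastLen (p : List Char) : Int := (((pvSplitNL p).getLast?.getD []).length : Int)

-- the coordinate B computes for a '#' whose strict prefix in the grid is p
def pvCoordAt (pad : List Int) (p : List Char) : List Int :=
  [((pvSplitNL p).length : Int) - 1, pvLastLen p] ++ pad

-- B's fold, abstracted over char lists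
def pvBfold (pad : List Int) (cs : List Char) : PySem.Set (List Int) :=
  (PySem.List.enumerate cs 0).foldl
    (fun s kc => if kc.2 = '#' then PySem.Set.add s (pvCoordAt pad (cs.take kc.1.toNat)) else s)
    ([] : PySem.Set (List Int))

lemma pvSplitNL_ne_nil (cs : List Char) : pvSplitNL cs ≠ [] := by
  cases cs with
  | nil => simp [pvSplitNL]
  | cons c cs =>
    simp only [pvSplitNL]
    split_ifs with h
    · simp
    · cases h2 : pvSplitNL cs <;> simp

lemma pvAppend_zeros (l : List Int) (init : List Int) :
    l.foldl (fun c _ => c ++ [(0 : Int)]) init = init ++ List.replicate l.length 0 := by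
  induction l generalizing init with
  | nil => simp
  | cons a l ih =>
    simp only [List.foldl_cons, ih, List.append_assoc, List.length_cons]
    simp [List.replicate_succ]

lemma pvCoord_eq (d x y : Int) :
    (PySem.List.pyRange 2 d 1).foldl (fun c _ => c ++ [(0 : Int)]) [x, y]
      = [x, y] ++ List.replicate (d - 2).toNat 0 := by
  rw [pvAppend_zeros, PySem.List.length_pyRange_one]

-- A as a single fold of pvStepA over the concatenated character stream
lemma pvA_eq (fileContent : List String) (d : Int) :
    parseInputFile fileContent d
      = (((fileContent.map String.toList).flatten).foldl
          (pvStepA (List.replicate (d - 2).toNat 0))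
          (([] : PySem.Set (List Int)), (0 : Int), (0 : Int))).1 := by
  unfold parseInputFile
  rw [List.foldl_flatten, List.foldl_map]
  have hstep : (fun (st : PySem.Set (List Int) × Int × Int) (location : Char) =>
      let st1 :=
        if location = '#' then
          (PySem.Set.add st.1
            ((PySem.List.pyRange 2 d 1).foldl
              (fun coordinate _ => coordinate ++ [(0 : Int)]) [st.2.1, st.2.2]),
           st.2)
        else st
      if location = '\n' then (st1.1, st1.2.1 + 1, (0 : Int))
      else (st1.1, st1.2.1, st1.2.2 + 1))
      = pvStepA (List.replicate (d - 2).toNat 0) := by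
    funext st c
    simp only [pvStepA, pvCoord_eq]
  rw [hstep]

-- snoc lemmas for the split
lemma pvSplitNL_snoc_nl (p : List Char) : pvSplitNL (p ++ ['\n']) = pvSplitNL p ++ [[]] := by
  induction p with
  | nil => simp [pvSplitNL]
  | cons c cs ih =>
    simp only [List.cons_append, pvSplitNL, ih]
    split_ifs with h
    · rfl
    · cases h2 : pvSplitNL cs with
      | nil => exact absurd h2 (pvSplitNL_ne_nil cs)
      | cons r rs => simp

lemma pvSplitNL_snoc (p : List Char) (c : Char) (hc : c ≠ '\n') :
    pvSplitNL (p ++ [c])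
      = (pvSplitNL p).dropLast ++ [((pvSplitNL p).getLast?.getD []) ++ [c]] := by
  induction p with
  | nil => simp [pvSplitNL, hc]
  | cons a p ih =>
    simp only [List.cons_append, pvSplitNL, ih]
    split_ifs with h
    · subst h
      cases h2 : pvSplitNL p with
      | nil => exact absurd h2 (pvSplitNL_ne_nil p)
      | cons r rs =>
        cases rs with
        | nil => simp [h2]
        | cons r2 rs2 => simp [h2]
    · cases h2 : pvSplitNL p with
      | nil => exact absurd h2 (pvSplitNL_ne_nil p)
      | cons r rs =>
        cases rs with
        | nil => simp [h2]
        | cons r2 rs2 => simp [h2]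

-- B's fold on a snoc grid
lemma pvBfold_snoc (pad : List Int) (cs : List Char) (c : Char) :
    pvBfold pad (cs ++ [c])
      = (if c = '#' then PySem.Set.add (pvBfold pad cs) (pvCoordAt pad cs) else pvBfold pad cs) := by
  unfold pvBfold
  rw [PySem.List.enumerate_append, List.foldl_append]
  have hcong : ∀ (s : PySem.Set (List Int)), ∀ kc ∈ PySem.List.enumerate cs 0,
      (if kc.2 = '#' then PySem.Set.add s (pvCoordAt pad ((cs ++ [c]).take kc.1.toNat)) else s)
        = (if kc.2 = '#' then PySem.Set.add s (pvCoordAt pad (cs.take kc.1.toNat)) else s) := by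
    intro s kc hmem
    obtain ⟨k, hk, rfl⟩ := (PySem.List.mem_enumerate_iff cs 0 kc).mp hmem
    have htake : (cs ++ [c]).take ((0 + (k : Int)).toNat) = cs.take ((0 + (k : Int)).toNat) := by
      rw [List.take_append_of_le_length]
      simp; omega
    rw [htake]
  rw [PySem.List.foldl_congr_mem _ _ _ _ hcong]
  simp only [PySem.List.enumerate, List.foldl_cons, List.foldl_nil]
  have htake : (cs ++ [c]).take ((0 + (cs.length : Int)).toNat) = cs := by
    simp
  rw [htake]

-- the main invariant: A's machine state after any prefix is B's split data for that prefix
lemma pvStepA_nl (pad : List Int) (st : PySem.Set (List Int) × Int × Int) :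
    pvStepA pad st '\n' = (st.1, st.2.1 + 1, 0) := by
  unfold pvStepA
  rw [if_neg (by decide : ¬ ('\n' : Char) = '#'), if_pos rfl]

lemma pvStepA_hash (pad : List Int) (st : PySem.Set (List Int) × Int × Int) :
    pvStepA pad st '#'
      = (PySem.Set.add st.1 ([st.2.1, st.2.2] ++ pad), st.2.1, st.2.2 + 1) := by
  unfold pvStepA
  rw [if_pos rfl, if_neg (by decide : ¬ ('#' : Char) = '\n')]

lemma pvStepA_other (pad : List Int) (st : PySem.Set (List Int) × Int × Int) (c : Char)
    (h1 : c ≠ '#') (h2 : c ≠ '\n') : pvStepA pad st c = (st.1, st.2.1, st.2.2 + 1) := by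
  unfold pvStepA
  rw [if_neg h1, if_neg h2]

lemma pvMain (pad : List Int) (cs : List Char) :
    cs.foldl (pvStepA pad) (([] : PySem.Set (List Int)), (0 : Int), (0 : Int))
      = (pvBfold pad cs, ((pvSplitNL cs).length : Int) - 1, pvLastLen cs) := by
  induction cs using List.reverseRecOn with
  | nil => simp [pvBfold, PySem.List.enumerate, pvSplitNL, pvLastLen]
  | append_singleton cs c ih =>
    rw [List.foldl_append, List.foldl_cons, List.foldl_nil, ih, pvBfold_snoc]
    have hne := pvSplitNL_ne_nil cs
    have hlen : 1 ≤ (pvSplitNL cs).length := List.length_pos_iff.mpr hne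
    have hlast2 : pvLastLen (cs ++ [c]) = (((pvSplitNL (cs ++ [c])).getLast?.getD []).length : Int) := rfl
    by_cases hnl : c = '\n'
    · subst hnl
      rw [pvStepA_nl, if_neg (by decide : ¬ ('\n' : Char) = '#')]
      refine Prod.ext rfl (Prod.ext ?_ ?_)
      · show ((pvSplitNL cs).length : Int) - 1 + 1 = ((pvSplitNL (cs ++ ['\n'])).length : Int) - 1
        rw [pvSplitNL_snoc_nl]
        simp
      · show (0 : Int) = pvLastLen (cs ++ ['\n'])
        rw [hlast2, pvSplitNL_snoc_nl]
        simp [List.getLast?_append]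
    · have hsnoc := pvSplitNL_snoc cs c hnl
      have hLlen : ((pvSplitNL (cs ++ [c])).length : Int) = ((pvSplitNL cs).length : Int) := by
        rw [hsnoc]
        simp [List.length_dropLast]
        omega
      have hLlast : pvLastLen (cs ++ [c]) = pvLastLen cs + 1 := by
        rw [hlast2, hsnoc]
        simp [pvLastLen, List.getLast?_append]
      by_cases hh : c = '#'
      · subst hh
        rw [pvStepA_hash, if_pos rfl]
        refine Prod.ext rfl (Prod.ext ?_ ?_)
        · show ((pvSplitNL cs).length : Int) - 1 = ((pvSplitNL (cs ++ ['#'])).length : Int) - 1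
          rw [hLlen]
        · show pvLastLen cs + 1 = pvLastLen (cs ++ ['#'])
          rw [hLlast]
      · rw [pvStepA_other pad _ c hh hnl, if_neg hh]
        refine Prod.ext rfl (Prod.ext ?_ ?_)
        · show ((pvSplitNL cs).length : Int) - 1 = ((pvSplitNL (cs ++ [c])).length : Int) - 1
          rw [hLlen]
        · show pvLastLen cs + 1 = pvLastLen (cs ++ [c])
          rw [hLlast]

-- join with empty separator = flatten
lemma pvJoin_nil_eq_flatten (parts : List (List Char)) :
    PySem.Chars.join [] parts = parts.flatten := by
  induction parts with
  | nil => simp [PySem.Chars.join_nil]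
  | cons p parts ih =>
    cases parts with
    | nil => simp [PySem.Chars.join_singleton]
    | cons q rest => rw [PySem.Chars.join_cons_cons, List.flatten_cons, ← ih]; simp

-- splitOn.go on a single-character separator
lemma pvGo_eq (fuel : Nat) :
    ∀ (l cur : List Char) (acc : List (List Char)), l.length ≤ fuel →
      PySem.Chars.splitOn.go ['\n'] fuel l cur acc
        = acc.reverse ++
          (match pvSplitNL l with
           | [] => [cur.reverse]
           | r :: rs => (cur.reverse ++ r) :: rs) := by
  induction fuel with
  | zero =>
    intro l cur acc hl
    have : l = [] := List.length_eq_zero_iff.mp (Nat.le_zero.mp hl)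
    subst this
    simp [PySem.Chars.splitOn.go, pvSplitNL]
  | succ fuel ih =>
    intro l cur acc hl
    cases l with
    | nil => simp [PySem.Chars.splitOn.go, pvSplitNL]
    | cons c rest =>
      by_cases hnl : c = '\n'
      · subst hnl
        have hpre : List.isPrefixOf ['\n'] ('\n' :: rest) = true := by
          simp [List.isPrefixOf]
        rw [show PySem.Chars.splitOn.go ['\n'] (fuel + 1) ('\n' :: rest) cur acc
              = PySem.Chars.splitOn.go ['\n'] fuel rest []
                  (cur.reverse :: acc) by
            simp [PySem.Chars.splitOn.go, hpre]]
        rw [ih rest [] (cur.reverse :: acc) (by simpa using Nat.lt_succ_iff.mp (by simpa using hl))]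
        simp only [pvSplitNL, List.reverse_cons, List.reverse_nil, List.nil_append]
        cases h : pvSplitNL rest with
        | nil => exact absurd h (pvSplitNL_ne_nil rest)
        | cons r rs => simp
      · have hpre : List.isPrefixOf ['\n'] (c :: rest) = false := by
          simp [List.isPrefixOf]
          exact fun h => hnl h.symm
        rw [show PySem.Chars.splitOn.go ['\n'] (fuel + 1) (c :: rest) cur acc
              = PySem.Chars.splitOn.go ['\n'] fuel rest (c :: cur) acc by
            simp [PySem.Chars.splitOn.go, hpre]]
        rw [ih rest (c :: cur) acc (by simpa using Nat.lt_succ_iff.mp (by simpa using hl))]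
        simp only [pvSplitNL, if_neg hnl, List.reverse_cons]
        cases h : pvSplitNL rest with
        | nil => exact absurd h (pvSplitNL_ne_nil rest)
        | cons r rs => simp

lemma pvSplitOn_eq (cs : List Char) : PySem.Chars.splitOn cs ['\n'] = pvSplitNL cs := by
  show PySem.Chars.splitOn.go ['\n'] (cs.length + 1) cs [] [] = _
  rw [pvGo_eq (cs.length + 1) cs [] [] (Nat.le_succ _)]
  cases h : pvSplitNL cs with
  | nil => exact absurd h (pvSplitNL_ne_nil cs)
  | cons r rs => simp

-- xs[-1] on a nonempty list
lemma pvGet_neg_one {α : Type} (xs : List α) (h : xs ≠ []) :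
    PySem.List.pyGet? xs (-1) = xs.getLast? := by
  have hlen : 1 ≤ xs.length := List.length_pos_iff.mpr h
  simp only [PySem.List.pyGet?, PySem.List.pyIdx?]
  rw [if_neg (by omega), if_pos (by simp; omega)]
  simp [List.getLast?_eq_getElem?]

-- B's port is pvBfold over the concatenated character stream
lemma pvB_eq (fileContent : List String) (d : Int) :
    parseInputFile_alt fileContent d
      = pvBfold (List.replicate (d - 2).toNat 0) ((fileContent.map String.toList).flatten) := by
  unfold parseInputFile_alt pvBfold
  dsimp only
  have hgrid : (PySem.Str.join "" fileContent).toList = (fileContent.map String.toList).flatten := by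
    rw [PySem.Str.toList_join]
    exact pvJoin_nil_eq_flatten _
  rw [hgrid]
  apply PySem.List.foldl_congr_mem
  intro s kc hmem
  obtain ⟨k, hk, rfl⟩ :=
    (PySem.List.mem_enumerate_iff ((fileContent.map String.toList).flatten) 0 kc).mp hmem
  by_cases hh : (fileContent.map String.toList).flatten[k] = '#'
  · set G := (fileContent.map String.toList).flatten with hG
    have hslice : (PySem.Str.slice (PySem.Str.join "" fileContent) none (some (0 + (k : Int)))).toList
        = G.take k := by
      rw [PySem.Str.toList_slice, hgrid]
      simp [PySem.List.slice_to_natCast G k]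
    obtain ⟨rows, hrows, hmap⟩ :
        ∃ rows, PySem.Str.split? (PySem.Str.slice (PySem.Str.join "" fileContent) none (some (0 + (k : Int)))) "\n" = some rows ∧
          rows.map String.toList = pvSplitNL (G.take k) := by
      have hb := PySem.Str.split?_map
        (PySem.Str.slice (PySem.Str.join "" fileContent) none (some (0 + (k : Int)))) "\n"
      rw [hslice] at hb
      have : PySem.Chars.split? (G.take k) "\n".toList = some (pvSplitNL (G.take k)) := by
        simp [PySem.Chars.split?, pvSplitOn_eq]
      rw [this] at hb
      cases hS : PySem.Str.split? (PySem.Str.slice (PySem.Str.join "" fileContent) none (some (0 + (k : Int)))) "\n" with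
      | none => rw [hS] at hb; simp at hb
      | some rows => rw [hS] at hb; exact ⟨rows, rfl, by simpa using hb⟩
    have hrne : rows ≠ [] := by
      intro h0
      rw [h0] at hmap
      exact pvSplitNL_ne_nil _ hmap.symm
    obtain ⟨last, hlast⟩ : ∃ last, rows.getLast? = some last := by
      cases h0 : rows.getLast? with
      | none => exact absurd (List.getLast?_eq_none_iff.mp h0) hrne
      | some v => exact ⟨v, rfl⟩
    have hlast2 : (pvSplitNL (G.take k)).getLast?.getD [] = last.toList := by
      rw [← hmap, List.getLast?_map, hlast]
      rfl
    have hlenrows : rows.length = (pvSplitNL (G.take k)).length := by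
      rw [← hmap, List.length_map]
    have htoNat : ((0 : Int) + (k : Int)).toNat = k := by omega
    simp only [hh, if_pos rfl, hrows, pvGet_neg_one rows hrne, hlast, pvCoordAt, pvLastLen,
      hlenrows, PySem.Str.len, htoNat]
    simp [← hG, hlast2]
  · simp [hh]

-- ===== VERDICT (by name: the statement is the Claim_ definition above) =====
theorem parseInputFile_spec : Claim_equal_parseInputFile := by
  intro fileContent dimensions _
  show parseInputFile fileContent dimensions = parseInputFile_alt fileContent dimensions
  rw [pvA_eq, pvB_eq, pvMain]
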